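-- pv_equiv track=rewrite | github.com/Rhaegal222/Unical | Primo Anno/Fondamenti di Programmazione 1/Esercizi/Old/NO domjudge/es2_esame.py | controlla_numeri
-- ===== SOURCE A (Python) =====
-- def controlla_numeri(numeri_giocati, numeri_estratti, i, contatore, risultato):
--     if i > 9:
--         return risultato
--     if numeri_giocati[i] in numeri_estratti:
--         return controlla_numeri(numeri_giocati, numeri_estratti, i+1, contatore+1, risultato)
--     else:
--         if risultato < contatore:
--             return controlla_numeri(numeri_giocati, numeri_estratti, i+1, 0, contatore)
--         else:
--             return controlla_numeri(numeri_giocati, numeri_estratti, i+1, 0, risultato)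
-- ===== SOURCE B (Python) =====
-- def controlla_numeri(numeri_giocati, numeri_estratti, i, contatore, risultato):
--     flags = [numeri_giocati[j] in numeri_estratti for j in range(i, 10)]
--     run, best = contatore, risultato
--     for f in flags:
--         if f:
--             run += 1
--         else:
--             if best < run:
--                 best = run
--             run = 0
--     return best
-- ===== Notes on version B (the rewrite author's own statement) =====
-- stated objective: idiomatic
-- what changed: Replaces the five-argument tail recursion by a two-phase iterative version: first a comprehension materialises the membership flags for indices i..9, then a single accumulator loop folds them into (run, best), deliberately not folding the trailing run in, matching A.
-- outside the precondition, e.g. on controlla_numeri([1, 2, 3, 4, 5, 6, 7, 8, 9, 10], [], -1, 0, 0): A returns 0, B returns 0; on controlla_numeri([1, 2, 3], [1], 0, 0, 0): A raises IndexError, B raises IndexError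
import Mathlib
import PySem

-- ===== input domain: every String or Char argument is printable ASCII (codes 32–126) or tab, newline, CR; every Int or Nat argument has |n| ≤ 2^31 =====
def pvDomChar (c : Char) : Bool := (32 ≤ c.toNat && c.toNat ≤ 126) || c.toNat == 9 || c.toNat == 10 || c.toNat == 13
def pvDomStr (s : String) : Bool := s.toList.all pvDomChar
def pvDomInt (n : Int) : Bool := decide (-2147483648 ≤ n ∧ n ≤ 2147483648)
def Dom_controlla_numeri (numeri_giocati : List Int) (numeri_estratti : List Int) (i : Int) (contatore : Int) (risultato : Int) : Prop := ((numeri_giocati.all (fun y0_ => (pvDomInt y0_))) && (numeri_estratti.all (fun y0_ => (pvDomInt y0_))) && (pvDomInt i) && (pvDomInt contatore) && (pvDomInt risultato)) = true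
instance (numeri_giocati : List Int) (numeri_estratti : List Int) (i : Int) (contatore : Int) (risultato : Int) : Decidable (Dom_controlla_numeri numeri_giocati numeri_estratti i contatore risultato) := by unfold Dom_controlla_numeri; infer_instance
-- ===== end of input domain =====

-- B replaces A's five-argument tail recursion by a two-phase iterative version (flag list, then one accumulator fold); same cost, plainer shape.


-- ===== PORT A =====
-- literal transliteration of A's tail recursion; 'numeri_giocati[i]' is PySem.List.pyGet?
-- (the .getD 0 default is never relevant under Pre_, where the index is in range)
def controlla_numeri (numeri_giocati : List Int) (numeri_estratti : List Int) (i : Int) (contatore : Int) (risultato : Int) : Int :=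
  if 9 < i then risultato
  else if ((PySem.List.pyGet? numeri_giocati i).getD 0) ∈ numeri_estratti then
    controlla_numeri numeri_giocati numeri_estratti (i + 1) (contatore + 1) risultato
  else if risultato < contatore then
    controlla_numeri numeri_giocati numeri_estratti (i + 1) 0 contatore
  else
    controlla_numeri numeri_giocati numeri_estratti (i + 1) 0 risultato
termination_by (10 - i).toNat
decreasing_by all_goals omega

-- ===== PORT B =====
-- Source B: build the flag list for indices i..9, then fold it with state (run, best); the trailing run is not folded in (as in A)
def controlla_numeri_alt (numeri_giocati : List Int) (numeri_estratti : List Int) (i : Int) (contatore : Int) (risultato : Int) : Int :=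
  let flags := (PySem.List.pyRange i 10 1).map
    (fun j => decide (((PySem.List.pyGet? numeri_giocati j).getD 0) ∈ numeri_estratti))
  (flags.foldl
    (fun (st : Int × Int) f =>
      if f then (st.1 + 1, st.2)
      else (0, if st.2 < st.1 then st.1 else st.2))
    (contatore, risultato)).2

-- ===== PRECONDITION & SPEC =====
-- Pre_ restricts to the natural domain: a non-negative start index i (negative i only "works" in A via
-- Python's negative-index wraparound, outside the function's intent) and, when the scan runs (i ≤ 9),
-- a list holding all ten played numbers; on shorter lists A raises IndexError.
def Pre_controlla_numeri (numeri_giocati : List Int) (numeri_estratti : List Int) (i : Int) (contatore : Int) (risultato : Int) : Prop :=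
  0 ≤ i ∧ (i ≤ 9 → 10 ≤ numeri_giocati.length)
instance (numeri_giocati : List Int) (numeri_estratti : List Int) (i : Int) (contatore : Int) (risultato : Int) : Decidable (Pre_controlla_numeri numeri_giocati numeri_estratti i contatore risultato) := by unfold Pre_controlla_numeri; infer_instance
def pvWitness_controlla_numeri : List Int × List Int × Int × Int × Int := ([3, 7, 1, 8, 2, 9, 4, 6, 5, 0], [7, 1, 2], 0, 0, 0)
def Spec_controlla_numeri (numeri_giocati : List Int) (numeri_estratti : List Int) (i : Int) (contatore : Int) (risultato : Int) (out : Int) : Prop := out = controlla_numeri_alt numeri_giocati numeri_estratti i contatore risultato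
instance (numeri_giocati : List Int) (numeri_estratti : List Int) (i : Int) (contatore : Int) (risultato : Int) (out : Int) : Decidable (Spec_controlla_numeri numeri_giocati numeri_estratti i contatore risultato out) := by unfold Spec_controlla_numeri; infer_instance

-- ===== CLAIM (what is proved, stated in full; the proofs are below) =====
def Claim_equal_controlla_numeri : Prop := ∀ (numeri_giocati : List Int) (numeri_estratti : List Int) (i : Int) (contatore : Int) (risultato : Int), Dom_controlla_numeri numeri_giocati numeri_estratti i contatore risultato → Pre_controlla_numeri numeri_giocati numeri_estratti i contatore risultato → Spec_controlla_numeri numeri_giocati numeri_estratti i contatore risultato (controlla_numeri numeri_giocati numeri_estratti i contatore risultato)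

-- ===== LEMMAS AND PROOFS =====
-- the two ports agree on every input (the proof does not even need Pre_)
theorem controlla_numeri_eq_alt (numeri_giocati numeri_estratti : List Int) :
    ∀ (n : ℕ) (i contatore risultato : Int), (10 - i).toNat = n →
      controlla_numeri numeri_giocati numeri_estratti i contatore risultato
        = controlla_numeri_alt numeri_giocati numeri_estratti i contatore risultato := by
  intro n
  induction n with
  | zero =>
    intro i c r hn
    have hi : 9 < i := by omega
    rw [controlla_numeri, if_pos hi]
    unfold controlla_numeri_alt
    rw [PySem.List.pyRange_one_eq_nil (by omega : (10:Int) ≤ i)]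
    simp
  | succ n ih =>
    intro i c r hn
    have hi : ¬ 9 < i := by omega
    have hcons := PySem.List.pyRange_one_cons (a := i) (b := 10) (by omega)
    unfold controlla_numeri_alt
    rw [hcons]
    simp only [List.map_cons, List.foldl_cons]
    rw [controlla_numeri, if_neg hi]
    by_cases hm : ((PySem.List.pyGet? numeri_giocati i).getD 0) ∈ numeri_estratti
    · rw [if_pos hm]
      rw [ih (i + 1) (c + 1) r (by omega)]
      unfold controlla_numeri_alt
      simp [hm]
    · rw [if_neg hm]
      by_cases hr : r < c
      · rw [if_pos hr]
        rw [ih (i + 1) 0 c (by omega)]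
        unfold controlla_numeri_alt
        simp [hm, hr]
      · rw [if_neg hr]
        rw [ih (i + 1) 0 r (by omega)]
        unfold controlla_numeri_alt
        simp [hm, hr]

-- ===== VERDICT (by name: the statement is the Claim_ definition above) =====
theorem controlla_numeri_spec : Claim_equal_controlla_numeri := by
  intro g e i c r _ _
  unfold Spec_controlla_numeri
  exact controlla_numeri_eq_alt g e (10 - i).toNat i c r rfl
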